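-- pv_equiv track=rewrite | github.com/AmanuelD02/Competitive-Programming | 2207-maximize-number-of-subsequences-in-a-string/2207-maximize-number-of-subsequences-in-a-string.py | maximumSubsequenceCount
-- ===== SOURCE A (Python) =====
-- def maximumSubsequenceCount(text: str, pattern: str) -> int:
--     res = cnt1 = cnt2 = 0
--     for i in text:
--         if i == pattern[1]:
--             res += cnt1
--             cnt2 +=1
--         if i ==pattern[0]:
--             cnt1 +=1
--     return res + max(cnt2 , cnt1)
-- ===== SOURCE B (Python) =====
-- def maximumSubsequenceCount(text: str, pattern: str) -> int:
--     p0, p1 = pattern[0], pattern[1]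
--     pos0 = [i for i, c in enumerate(text) if c == p0]
--     pos1 = [i for i, c in enumerate(text) if c == p1]
--     res = 0
--     k = 0
--     for j in pos1:
--         while k < len(pos0) and pos0[k] < j:
--             k += 1
--         res += k
--     return res + max(len(pos0), len(pos1))
-- ===== Notes on version B (the rewrite author's own statement) =====
-- stated objective: alternative
-- what changed: B first extracts the sorted index lists of pattern[0]- and pattern[1]-occurrences and then counts crossing pairs by a two-pointer merge of the two position lists, instead of A's single left-to-right pass with running character counters.
-- outside the precondition, e.g. on maximumSubsequenceCount('', 'a'): A returns 0, B raises IndexError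
import Mathlib
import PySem

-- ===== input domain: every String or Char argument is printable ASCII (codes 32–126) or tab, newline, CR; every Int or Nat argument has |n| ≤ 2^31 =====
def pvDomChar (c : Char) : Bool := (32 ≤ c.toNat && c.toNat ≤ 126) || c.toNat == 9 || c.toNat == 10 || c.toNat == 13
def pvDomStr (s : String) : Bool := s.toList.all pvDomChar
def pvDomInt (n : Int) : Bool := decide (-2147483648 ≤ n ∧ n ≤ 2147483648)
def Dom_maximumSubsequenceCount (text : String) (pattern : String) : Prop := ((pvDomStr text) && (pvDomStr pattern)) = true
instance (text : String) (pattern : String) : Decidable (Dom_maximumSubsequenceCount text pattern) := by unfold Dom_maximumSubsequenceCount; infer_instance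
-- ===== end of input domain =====

-- B extracts the sorted index lists of pattern[0]/pattern[1] occurrences and counts crossing
-- pairs by a two-pointer merge of the two position lists, instead of A's single running-counter pass.

-- ===== PORT A =====
-- A's loop body: state (res, cnt1, cnt2), the two ifs in A's order
def pvStepA (p0 p1 : Char) (st : Int × Int × Int) (i : Char) : Int × Int × Int :=
  let res := st.1; let cnt1 := st.2.1; let cnt2 := st.2.2
  let res := if i = p1 then res + cnt1 else res
  let cnt2 := if i = p1 then cnt2 + 1 else cnt2
  let cnt1 := if i = p0 then cnt1 + 1 else cnt1
  (res, cnt1, cnt2)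

def maximumSubsequenceCount (text : String) (pattern : String) : Int :=
  match PySem.Str.pyGet? pattern 0, PySem.Str.pyGet? pattern 1 with
  | some p0, some p1 =>
    let s := text.toList.foldl (pvStepA p0 p1) (0, 0, 0)
    s.1 + max s.2.2 s.2.1
  | _, _ => 0   -- pattern[1] (or pattern[0]) raises IndexError: excluded by Pre_

-- ===== PORT B =====
-- [i for i, c in enumerate(text) if c == p] (enumerate starts at s; Source B uses s = 0)
def pvPositions (p : Char) (l : List Char) (s : Int) : List Int :=
  (PySem.List.enumerate l s).filterMap (fun q => if q.2 = p then some q.1 else none)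

-- the inner 'while k < len(pos0) and pos0[k] < j: k += 1'
def pvAdvance (pos0 : List Int) (j : Int) (k : Nat) : Nat :=
  if h : k < pos0.length then
    if pos0[k] < j then pvAdvance pos0 j (k + 1) else k
  else k
termination_by pos0.length - k
decreasing_by omega

-- the body of 'for j in pos1', state (res, k)
def pvStepB (pos0 : List Int) (st : Int × Nat) (j : Int) : Int × Nat :=
  let k := pvAdvance pos0 j st.2
  (st.1 + (k : Int), k)

def maximumSubsequenceCount_alt (text : String) (pattern : String) : Int :=
  match PySem.Str.pyGet? pattern 0 with
  | none => 0   -- pattern[0] raises IndexError: excluded by Pre_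
  | some p0 =>
    match PySem.Str.pyGet? pattern 1 with
    | none => 0   -- pattern[1] raises IndexError: excluded by Pre_
    | some p1 =>
      let pos0 := pvPositions p0 text.toList 0
      let pos1 := pvPositions p1 text.toList 0
      let s := pos1.foldl (pvStepB pos0) (0, 0)
      s.1 + max (pos0.length : Int) (pos1.length : Int)

-- ===== PRECONDITION & SPEC =====
-- Pre_ excludes patterns of length < 2: there A raises IndexError at pattern[1] unless text is empty (its loop never
-- touches pattern, so it returns 0), while B reads pattern[0]/pattern[1] up front and raises on every text.
def Pre_maximumSubsequenceCount (text : String) (pattern : String) : Prop := 2 ≤ pattern.toList.length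
instance (text : String) (pattern : String) : Decidable (Pre_maximumSubsequenceCount text pattern) := by unfold Pre_maximumSubsequenceCount; infer_instance
def pvWitness_maximumSubsequenceCount : String × String := ("abab", "ab")

def Spec_maximumSubsequenceCount (text : String) (pattern : String) (out : Int) : Prop := out = maximumSubsequenceCount_alt text pattern
instance (text : String) (pattern : String) (out : Int) : Decidable (Spec_maximumSubsequenceCount text pattern out) := by unfold Spec_maximumSubsequenceCount; infer_instance

-- ===== CLAIM (what is proved, stated in full; the proofs are below) =====
def Claim_equal_maximumSubsequenceCount : Prop := ∀ (text : String) (pattern : String), Dom_maximumSubsequenceCount text pattern → Pre_maximumSubsequenceCount text pattern → Spec_maximumSubsequenceCount text pattern (maximumSubsequenceCount text pattern)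

-- ===== LEMMAS AND PROOFS =====

-- count of a character, as Int
def pvCnt (c : Char) (l : List Char) : Int := (l.countP (fun x => x = c) : Int)

-- number of pairs i < j with l[i] = p0 and l[j] = p1, counted from the left element
def pvW (p0 p1 : Char) : List Char → Int
  | [] => 0
  | x :: t => (if x = p0 then pvCnt p1 t else 0) + pvW p0 p1 t

-- Σ_{j ∈ l1} #{x ∈ pos0 : x < j}
def pvS (pos0 : List Int) : List Int → Int
  | [] => 0
  | j :: t => (pos0.countP (fun x => decide (x < j)) : Int) + pvS pos0 t

theorem pvCnt_cons (c x : Char) (t : List Char) :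
    pvCnt c (x :: t) = (if x = c then 1 else 0) + pvCnt c t := by
  simp [pvCnt, List.countP_cons]
  split_ifs <;> ring

-- A's forward loop, characterized with a general starting state
theorem pvFwd (p0 p1 : Char) (l : List Char) : ∀ (res c1 c2 : Int),
    l.foldl (pvStepA p0 p1) (res, c1, c2)
    = (res + pvW p0 p1 l + c1 * pvCnt p1 l, c1 + pvCnt p0 l, c2 + pvCnt p1 l) := by
  induction l with
  | nil => intro res c1 c2; simp [pvW, pvCnt]
  | cons x t ih =>
    intro res c1 c2
    simp only [List.foldl_cons, pvStepA, ih, pvW, pvCnt_cons, Prod.mk.injEq]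
    refine ⟨?_, ?_, ?_⟩ <;> split_ifs <;> ring

theorem pvPositions_cons (p x : Char) (t : List Char) (s : Int) :
    pvPositions p (x :: t) s = (if x = p then [s] else []) ++ pvPositions p t (s + 1) := by
  simp only [pvPositions, PySem.List.enumerate_cons, List.filterMap_cons]
  split_ifs <;> simp

theorem pvPositions_length (p : Char) (l : List Char) : ∀ s : Int,
    ((pvPositions p l s).length : Int) = pvCnt p l := by
  induction l with
  | nil => intro s; simp [pvPositions, pvCnt]
  | cons x t ih =>
    intro s
    rw [pvPositions_cons, pvCnt_cons]
    simp only [List.length_append]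
    push_cast
    rw [ih]
    split_ifs <;> simp

theorem pvPositions_mem_ge (p : Char) (l : List Char) : ∀ (s : Int) (j : Int),
    j ∈ pvPositions p l s → s ≤ j := by
  induction l with
  | nil => intro s j h; simp [pvPositions] at h
  | cons x t ih =>
    intro s j h
    rw [pvPositions_cons] at h
    rcases List.mem_append.mp h with h | h
    · split_ifs at h <;> simp at h; omega
    · have := ih (s + 1) j h; omega

theorem pvPositions_sorted (p : Char) (l : List Char) : ∀ s : Int,
    (pvPositions p l s).Pairwise (· < ·) := by
  induction l with
  | nil => intro s; simp [pvPositions]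
  | cons x t ih =>
    intro s
    rw [pvPositions_cons]
    apply List.pairwise_append.mpr
    refine ⟨?_, ih (s + 1), ?_⟩
    · split_ifs <;> simp
    · intro a ha b hb
      have hb' := pvPositions_mem_ge p t (s + 1) b hb
      split_ifs at ha <;> simp at ha
      omega

-- countP (< j) on a list whose elements are all ≥ the bound is 0
theorem pvCount_lt_zero (a : List Int) (j : Int) (h : ∀ x ∈ a, j ≤ x) :
    a.countP (fun x => decide (x < j)) = 0 := by
  rw [List.countP_eq_zero]
  intro x hx
  simpa using not_lt.mpr (h x hx)

theorem pvS_append_left (a b : List Int) : ∀ l : List Int,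
    pvS (a ++ b) l = pvS a l + pvS b l := by
  intro l
  induction l with
  | nil => simp [pvS]
  | cons j t ih =>
    simp only [pvS, List.countP_append, ih]
    push_cast
    ring

theorem pvS_single_gt (s : Int) : ∀ l : List Int, (∀ j ∈ l, s < j) →
    pvS [s] l = (l.length : Int) := by
  intro l
  induction l with
  | nil => intro _; simp [pvS]
  | cons j t ih =>
    intro h
    have hj : s < j := h j (by simp)
    simp only [pvS, List.length_cons]
    rw [ih (fun x hx => h x (List.mem_cons_of_mem _ hx))]
    have h1 : List.countP (fun x => decide (x < j)) [s] = 1 := by simp [hj]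
    rw [h1]
    push_cast
    ring

-- pvS over the two position lists is exactly the pair count pvW
theorem pvS_pos (p0 p1 : Char) (l : List Char) : ∀ s : Int,
    pvS (pvPositions p0 l s) (pvPositions p1 l s) = pvW p0 p1 l := by
  induction l with
  | nil => intro s; simp [pvPositions, pvS, pvW]
  | cons x t ih =>
    intro s
    rw [pvPositions_cons, pvPositions_cons]
    have hge1 : ∀ j ∈ pvPositions p1 t (s + 1), s < j := fun j hj => by
      have := pvPositions_mem_ge p1 t (s + 1) j hj; omega
    have hz : List.countP (fun y => decide (y < s)) ([s] ++ pvPositions p0 t (s + 1)) = 0 := by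
      apply pvCount_lt_zero
      intro y hy
      rcases List.mem_append.mp hy with h | h
      · simp at h; omega
      · have := pvPositions_mem_ge p0 t (s + 1) y h; omega
    have hz0 : List.countP (fun y => decide (y < s)) (pvPositions p0 t (s + 1)) = 0 := by
      apply pvCount_lt_zero
      intro y hy
      have := pvPositions_mem_ge p0 t (s + 1) y hy; omega
    by_cases hp0 : x = p0 <;> by_cases hp1 : x = p1
    · rw [if_pos hp0, if_pos hp1,
          show ([s] ++ pvPositions p1 t (s + 1)) = s :: pvPositions p1 t (s + 1) from rfl,
          pvS, hz, pvS_append_left, pvS_single_gt s _ hge1, ih (s + 1), pvPositions_length]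
      simp [pvW, hp0]
    · rw [if_pos hp0, if_neg hp1,
          show (([] : List Int) ++ pvPositions p1 t (s + 1)) = pvPositions p1 t (s + 1) from rfl,
          pvS_append_left, pvS_single_gt s _ hge1, ih (s + 1), pvPositions_length]
      simp [pvW, hp0]
    · rw [if_neg hp0, if_pos hp1,
          show (([] : List Int) ++ pvPositions p0 t (s + 1)) = pvPositions p0 t (s + 1) from rfl,
          show ([s] ++ pvPositions p1 t (s + 1)) = s :: pvPositions p1 t (s + 1) from rfl,
          pvS, hz0, ih (s + 1)]
      simp [pvW, hp0]
    · rw [if_neg hp0, if_neg hp1,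
          show (([] : List Int) ++ pvPositions p0 t (s + 1)) = pvPositions p0 t (s + 1) from rfl,
          show (([] : List Int) ++ pvPositions p1 t (s + 1)) = pvPositions p1 t (s + 1) from rfl,
          ih (s + 1)]
      simp [pvW, hp0]

-- in a strictly increasing list, a[i] < j iff i < countP(< j)
theorem pvSorted_lt_iff (a : List Int) (ha : a.Pairwise (· < ·)) (j : Int) :
    ∀ (i : Nat) (hi : i < a.length), (a[i] < j ↔ i < a.countP (fun x => decide (x < j))) := by
  induction a with
  | nil => intro i hi; simp at hi
  | cons x t ih =>
    have hx : ∀ y ∈ t, x < y := (List.pairwise_cons.mp ha).1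
    have ht : t.Pairwise (· < ·) := (List.pairwise_cons.mp ha).2
    intro i hi
    match i with
    | 0 =>
      simp only [List.getElem_cons_zero]
      by_cases hxj : x < j
      · have hc : 0 < List.countP (fun y => decide (y < j)) (x :: t) := by
          simp [List.countP_cons, hxj]
        constructor
        · intro _; exact hc
        · intro _; exact hxj
      · have h0 : t.countP (fun y => decide (y < j)) = 0 :=
          pvCount_lt_zero t j (fun y hy => by have := hx y hy; omega)
        have hc : List.countP (fun y => decide (y < j)) (x :: t) = 0 := by
          simp [List.countP_cons, hxj, h0]
        rw [hc]
        constructor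
        · intro h; exact absurd h hxj
        · intro h; omega
    | i + 1 =>
      have hit : i < t.length := by
        simp only [List.length_cons] at hi
        omega
      simp only [List.getElem_cons_succ]
      have hih := ih ht i hit
      by_cases hxj : x < j
      · have hc : List.countP (fun y => decide (y < j)) (x :: t)
            = List.countP (fun y => decide (y < j)) t + 1 := by
          simp [List.countP_cons, hxj]
        rw [hc]
        constructor
        · intro h; have := hih.mp h; omega
        · intro h; exact hih.mpr (by omega)
      · have h0 : t.countP (fun y => decide (y < j)) = 0 :=
          pvCount_lt_zero t j (fun y hy => by have := hx y hy; omega)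
        have hc : List.countP (fun y => decide (y < j)) (x :: t) = 0 := by
          simp [List.countP_cons, hxj, h0]
        rw [hc]
        have hti : ¬ t[i]'hit < j := by
          have := hx (t[i]'hit) (t.getElem_mem hit)
          omega
        constructor
        · intro h; exact absurd h hti
        · intro h; omega

theorem pvAdvance_eq (a : List Int) (ha : a.Pairwise (· < ·)) (j : Int) :
    ∀ (d k : Nat), k ≤ a.countP (fun x => decide (x < j)) →
      a.countP (fun x => decide (x < j)) - k ≤ d →
      pvAdvance a j k = a.countP (fun x => decide (x < j)) := by
  intro d
  induction d with
  | zero =>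
    intro k hk hd
    have hkm : k = a.countP (fun x => decide (x < j)) := by omega
    rw [pvAdvance]
    split_ifs with h1 h2
    · exfalso
      have := (pvSorted_lt_iff a ha j k h1).mp h2
      omega
    · exact hkm
    · exact hkm
  | succ d ihd =>
    intro k hk hd
    rw [pvAdvance]
    split_ifs with h1 h2
    · have hlt := (pvSorted_lt_iff a ha j k h1).mp h2
      exact ihd (k + 1) (by omega) (by omega)
    · have hm : ¬ k < a.countP (fun x => decide (x < j)) := fun hc =>
        h2 ((pvSorted_lt_iff a ha j k h1).mpr hc)
      omega
    · have hm : ¬ k < a.countP (fun x => decide (x < j)) := fun hc =>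
        h1 (lt_of_lt_of_le hc List.countP_le_length)
      omega

-- countP(< ·) is monotone in the bound
theorem pvCount_mono (a : List Int) (j j' : Int) (h : j ≤ j') :
    a.countP (fun x => decide (x < j)) ≤ a.countP (fun x => decide (x < j')) := by
  apply List.countP_mono_left
  intro x _ hx
  simp at hx ⊢
  omega

-- B's two-pointer loop over pos1, characterized
theorem pvFoldTP (a : List Int) (ha : a.Pairwise (· < ·)) :
    ∀ (l : List Int), l.Pairwise (· < ·) →
    ∀ (res : Int) (k : Nat), (∀ j ∈ l, k ≤ a.countP (fun x => decide (x < j))) →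
      (l.foldl (pvStepB a) (res, k)).1 = res + pvS a l := by
  intro l
  induction l with
  | nil => intro _ res k _; simp [pvS]
  | cons j t ih =>
    intro hp res k hk
    have hj : k ≤ a.countP (fun x => decide (x < j)) := hk j (by simp)
    have hadv : pvAdvance a j k = a.countP (fun x => decide (x < j)) :=
      pvAdvance_eq a ha j _ k hj le_rfl
    rw [List.foldl_cons]
    simp only [pvStepB, hadv]
    rw [ih (List.pairwise_cons.mp hp).2]
    · simp [pvS]; ring
    · intro j' hj'
      have hlt : j < j' := (List.pairwise_cons.mp hp).1 j' hj'
      exact pvCount_mono a j j' (le_of_lt hlt)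

-- ===== VERDICT (by name: the statement is the Claim_ definition above) =====
theorem maximumSubsequenceCount_spec : Claim_equal_maximumSubsequenceCount := by
  intro text pattern _ hpre
  unfold Spec_maximumSubsequenceCount maximumSubsequenceCount maximumSubsequenceCount_alt
  unfold Pre_maximumSubsequenceCount at hpre
  have h0 : PySem.Str.pyGet? pattern 0 = some (pattern.toList[0]'(by omega)) := by
    simpa using PySem.List.pyGet?_ofNat (xs := pattern.toList) (n := 0) (by omega)
  have h1 : PySem.Str.pyGet? pattern 1 = some (pattern.toList[1]'(by omega)) := by
    simpa using PySem.List.pyGet?_ofNat (xs := pattern.toList) (n := 1) (by omega)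
  rw [h0, h1]
  dsimp only
  set p0 := pattern.toList[0]'(by omega)
  set p1 := pattern.toList[1]'(by omega)
  rw [pvFwd]
  rw [pvFoldTP (pvPositions p0 text.toList 0) (pvPositions_sorted p0 text.toList 0)
        (pvPositions p1 text.toList 0) (pvPositions_sorted p1 text.toList 0)
        0 0 (fun _ _ => Nat.zero_le _)]
  rw [pvS_pos, pvPositions_length, pvPositions_length]
  dsimp only
  simp only [zero_add, zero_mul, add_zero]
  rw [max_comm]
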